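-- pv_equiv track=rewrite | github.com/bschink/pocket-narrator | pocket_narrator/models/ngram_model.py | _would_create_repeated_ngram
-- ===== SOURCE A (Python) =====
-- def _would_create_repeated_ngram(history: list[int], candidate: int, ngram_size: int) -> bool:
--     """
--     Check if adding `candidate` to `history` would create an n-gram
--     that already appears in the history.
--     """
--     if ngram_size is None or ngram_size < 2:
--         return False
--     if len(history) + 1 < ngram_size:
--         return False
--
--     # last ngram_size-1 tokens + candidate
--     new_ngram = tuple(history[-(ngram_size - 1):] + [candidate])
--     # slide over history
--     for i in range(len(history) - ngram_size + 1):
--         if tuple(history[i : i + ngram_size]) == new_ngram: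
--             return True
--     return False
-- ===== SOURCE B (Python) =====
-- def _would_create_repeated_ngram(history: list[int], candidate: int, ngram_size: int) -> bool:
--     """
--     Check if adding `candidate` to `history` would create an n-gram
--     that already appears in the history.
--
--     Rabin-Karp style: maintain a rolling window sum as a cheap O(1) filter;
--     the full O(k) window comparison only runs when the sums match.
--     """
--     if ngram_size is None or ngram_size < 2:
--         return False
--     n = len(history)
--     k = ngram_size
--     if n + 1 < k:
--         return False
--     pattern = history[n - (k - 1):] + [candidate]
--     target = sum(pattern)
--     s = sum(history[:k])
--     for i in range(n - k + 1):
--         if s == target and history[i:i + k] == pattern: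
--             return True
--         if i + k < n:
--             s += history[i + k] - history[i]
--     return False
-- ===== Notes on version B (the rewrite author's own statement) =====
-- stated objective: faster
-- what changed: A compares every length-k window against the new n-gram; B is Rabin-Karp with an additive rolling hash: it maintains the running window sum in O(1) per step and performs the O(k) window comparison only when the sum equals the pattern's sum.
import Mathlib
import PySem

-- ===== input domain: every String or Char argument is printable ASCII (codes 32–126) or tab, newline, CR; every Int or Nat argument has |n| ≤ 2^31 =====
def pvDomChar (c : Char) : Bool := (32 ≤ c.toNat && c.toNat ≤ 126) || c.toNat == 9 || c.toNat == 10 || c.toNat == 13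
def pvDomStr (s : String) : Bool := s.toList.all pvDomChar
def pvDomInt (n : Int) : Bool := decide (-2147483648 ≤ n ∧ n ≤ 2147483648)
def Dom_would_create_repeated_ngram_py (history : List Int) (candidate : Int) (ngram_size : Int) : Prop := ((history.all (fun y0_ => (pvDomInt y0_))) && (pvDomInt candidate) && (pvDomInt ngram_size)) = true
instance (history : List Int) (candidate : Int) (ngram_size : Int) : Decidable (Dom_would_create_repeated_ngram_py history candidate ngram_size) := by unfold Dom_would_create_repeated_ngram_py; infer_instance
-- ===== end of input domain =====

-- B replaces A's compare-every-window scan by Rabin-Karp with an additive rolling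
-- hash: a running window sum is updated in O(1) per step and the full window
-- comparison runs only when the sum matches the pattern's sum.

-- ===== PORT A =====
def would_create_repeated_ngram_py (history : List Int) (candidate : Int) (ngram_size : Int) : Bool :=
  if ngram_size < 2 then false
  else if (history.length : Int) + 1 < ngram_size then false
  else
    -- last ngram_size-1 tokens + candidate
    let new_ngram := PySem.List.slice history (some (-(ngram_size - 1))) none ++ [candidate]
    -- slide over history
    (PySem.List.pyRange 0 ((history.length : Int) - ngram_size + 1) 1).any
      (fun i => PySem.List.slice history (some i) (some (i + ngram_size)) == new_ngram)

-- ===== PORT B =====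
-- the loop of Source B: `fuel` counts the remaining iterations of `for i in range(n-k+1)`
def pvAltGo (h pat : List Int) (tgt k : Int) : Nat → Int → Int → Bool
  | 0, _, _ => false
  | fuel+1, i, s =>
    if s == tgt && PySem.List.slice h (some i) (some (i + k)) == pat then true
    else pvAltGo h pat tgt k fuel (i + 1)
      (if i + k < (h.length : Int) then s + PySem.List.pyGetD h (i + k) 0 - PySem.List.pyGetD h i 0 else s)

def would_create_repeated_ngram_py_alt (history : List Int) (candidate : Int) (ngram_size : Int) : Bool :=
  if ngram_size < 2 then false
  else
    let n : Int := history.length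
    if n + 1 < ngram_size then false
    else
      let pattern := PySem.List.slice history (some (n - (ngram_size - 1))) none ++ [candidate]
      let target := pattern.sum
      let s0 := (PySem.List.slice history none (some ngram_size)).sum
      pvAltGo history pattern target ngram_size (n - ngram_size + 1).toNat 0 s0

-- ===== PRECONDITION & SPEC =====
def Spec_would_create_repeated_ngram_py (history : List Int) (candidate : Int) (ngram_size : Int) (out : Bool) : Prop := out = would_create_repeated_ngram_py_alt history candidate ngram_size
instance (history : List Int) (candidate : Int) (ngram_size : Int) (out : Bool) : Decidable (Spec_would_create_repeated_ngram_py history candidate ngram_size out) := by unfold Spec_would_create_repeated_ngram_py; infer_instance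

-- ===== CLAIM (what is proved, stated in full; the proofs are below) =====
def Claim_equal_would_create_repeated_ngram_py : Prop := ∀ (history : List Int) (candidate : Int) (ngram_size : Int), Dom_would_create_repeated_ngram_py history candidate ngram_size → Spec_would_create_repeated_ngram_py history candidate ngram_size (would_create_repeated_ngram_py history candidate ngram_size)

-- ===== LEMMAS AND PROOFS =====

-- shifting the window by one changes its sum by the new element minus the dropped one
theorem pv_sum_shift (h : List Int) (i M : Nat) (hiM : i + M < h.length) :
    ((h.drop (i+1)).take M).sum
      = ((h.drop i).take M).sum + h[i+M]'hiM - h[i]'(by omega) := by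
  have e1 : (h.drop i).take (M+1) = h[i]'(by omega) :: (h.drop (i+1)).take M := by
    rw [List.drop_eq_getElem_cons (by omega), List.take_succ_cons]
  have e2 : (h.drop i).take (M+1) = (h.drop i).take M ++ [h[i+M]'hiM] := by
    rw [List.take_add_one]
    have : (h.drop i)[M]? = some (h[i+M]'hiM) := by
      rw [List.getElem?_drop, List.getElem?_eq_getElem hiM]
    rw [this]; rfl
  have := congrArg List.sum (e1.symm.trans e2)
  simp only [List.sum_cons, List.sum_append, List.sum_cons, List.sum_nil] at this
  omega

-- the rolling-sum loop finds a window equal to `pat` iff one exists from position i on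
theorem pv_loop (h pat : List Int) (M : Nat) :
    ∀ (fuel i : Nat) (s : Int), i + fuel = h.length + 1 - M → M ≤ h.length + 1 →
      s = ((h.drop i).take M).sum →
      (pvAltGo h pat pat.sum (M:Int) fuel (i:Int) s = true ↔
        ∃ j, i ≤ j ∧ j < h.length + 1 - M ∧ (h.drop j).take M = pat) := by
  intro fuel
  induction fuel with
  | zero =>
    intro i s hfe _ _
    simp only [pvAltGo]
    constructor
    · intro hh; exact absurd hh (by simp)
    · rintro ⟨j, hj1, hj2, _⟩; omega
  | succ f ih =>
    intro i s hfe hM hs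
    have hiM : i + M ≤ h.length := by omega
    simp only [pvAltGo]
    rw [PySem.List.slice_natCast_add]
    by_cases hp : (h.drop i).take M = pat
    · have hsum : s = pat.sum := by rw [hs, hp]
      simp only [hp, hsum, beq_self_eq_true, Bool.and_true, if_true]
      constructor
      · intro _; exact ⟨i, le_refl i, by omega, hp⟩
      · intro _; trivial
    · have hbe : (((h.drop i).take M : List Int) == pat) = false := by
        simp [hp]
      rw [hbe, Bool.and_false, if_neg (by simp)]
      rcases Nat.eq_zero_or_pos f with hf0 | hfpos
      · subst hf0
        simp only [pvAltGo]
        constructor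
        · intro hh; exact absurd hh (by simp)
        · rintro ⟨j, hj1, hj2, hj3⟩
          have : j = i := by omega
          exact absurd (this ▸ hj3) hp
      · -- f ≥ 1, so the window can shift: i + M < h.length
        have hlt : i + M < h.length := by omega
        have hguard : ((i:Int) + (M:Int) < (h.length : Int)) := by exact_mod_cast hlt
        rw [if_pos hguard]
        have hg1 : PySem.List.pyGetD h ((i:Int) + (M:Int)) 0 = h[i+M]'hlt := by
          rw [PySem.List.pyGetD_eq_getElem h 0 (by omega) (by exact_mod_cast hlt)]
          simp only [show ((i:Int) + (M:Int)).toNat = i + M from by omega]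
        have hg2 : PySem.List.pyGetD h (i:Int) 0 = h[i]'(by omega) := by
          rw [PySem.List.pyGetD_eq_getElem h 0 (by omega)
            (by exact_mod_cast Nat.lt_of_le_of_lt (Nat.le_add_right i M) hlt)]
          simp only [Int.toNat_natCast]
        have hcast : ((i:Int) + 1) = ((i+1 : Nat) : Int) := by push_cast; ring
        rw [hg1, hg2, hcast]
        rw [ih (i+1) _ (by omega) hM (by rw [hs, pv_sum_shift h i M hlt])]
        constructor
        · rintro ⟨j, hj1, hj2, hj3⟩; exact ⟨j, by omega, hj2, hj3⟩
        · rintro ⟨j, hj1, hj2, hj3⟩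
          refine ⟨j, ?_, hj2, hj3⟩
          rcases Nat.eq_or_lt_of_le hj1 with he | hl
          · exact absurd (he ▸ hj3) hp
          · omega

theorem pv_main (h : List Int) (c k : Int) :
    would_create_repeated_ngram_py h c k = would_create_repeated_ngram_py_alt h c k := by
  unfold would_create_repeated_ngram_py would_create_repeated_ngram_py_alt
  by_cases hk : k < 2
  · simp [hk]
  · by_cases hn : (h.length : Int) + 1 < k
    · simp [hk, hn]
    · simp only [if_neg hk, if_neg hn]
      rw [not_lt] at hk hn
      set L := h.length with hL
      set M : Nat := k.toNat with hMdef
      have hkM : k = (M:Int) := by omega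
      have hML : M ≤ L + 1 := by omega
      have hM2 : 2 ≤ M := by omega
      -- the two pattern expressions coincide
      have hk1 : k - 1 = ((M-1 : Nat) : Int) := by omega
      have hpat1 : PySem.List.slice h (some (-(k - 1))) none = h.drop (L - (M-1)) := by
        rw [hk1, PySem.List.slice_from_neg_natCast h (M-1) (by omega)]
      have hcast : (L:Int) - (k-1) = ((L - (M-1) : Nat) : Int) := by omega
      have hpat2 : PySem.List.slice h (some ((L:Int) - (k-1))) none = h.drop (L - (M-1)) := by
        rw [hcast, PySem.List.slice_from_natCast]
      rw [hpat1, hpat2]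
      -- the initial rolling sum is the sum of window 0
      have hs0 : (PySem.List.slice h none (some k)).sum = ((h.drop 0).take M).sum := by
        rw [PySem.List.slice_to h (by omega)]
        simp [hMdef]
      have hfuel : ((L:Int) - k + 1).toNat = L + 1 - M := by omega
      rw [hfuel, hkM]
      have hloop := pv_loop h (h.drop (L - (M-1)) ++ [c]) M (L + 1 - M) 0
        ((PySem.List.slice h none (some ((M:Nat):Int))).sum)
        (by omega) hML (by rw [← hkM]; exact hs0)
      simp only [Nat.cast_zero] at hloop
      rw [Bool.eq_iff_iff, hloop]
      simp only [List.any_eq_true, PySem.List.mem_pyRange_one, beq_iff_eq]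
      constructor
      · rintro ⟨i, ⟨hi0, hi1⟩, hw⟩
        refine ⟨i.toNat, by omega, by omega, ?_⟩
        have : i = ((i.toNat : Nat) : Int) := by omega
        rw [this, PySem.List.slice_natCast_add] at hw
        exact hw
      · rintro ⟨j, _, hj2, hj3⟩
        refine ⟨(j:Int), ⟨by omega, by omega⟩, ?_⟩
        rw [PySem.List.slice_natCast_add]
        exact hj3

-- ===== VERDICT (by name: the statement is the Claim_ definition above) =====
theorem would_create_repeated_ngram_py_spec : Claim_equal_would_create_repeated_ngram_py := by
  intro h c k _
  exact pv_main h c k
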